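-- pv_equiv track=rewrite | github.com/cjarchibald/cosmo-codenames-25 | utils.py | format_guesses
-- ===== SOURCE A (Python) =====
-- def format_guesses(color_list, limit):
--     categories = [0,0,0,0]
--
--     for i, color in enumerate(color_list):
--         if i >= limit: break
--         categories[color] +=1
--         if color != 0:
--             break
--     return categories
-- ===== SOURCE B (Python) =====
-- def format_guesses(color_list, limit):
--     # Different decomposition: compute the effective prefix length, locate the
--     # first nonzero color by index, and build the result directly (no counting loop).
--     n = max(0, min(limit, len(color_list)))
--     idx = next((i for i in range(n) if color_list[i] != 0), None)
--     categories = [0, 0, 0, 0]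
--     if idx is None:
--         categories[0] = n
--     else:
--         categories[0] = idx
--         categories[color_list[idx]] += 1
--     return categories
-- ===== Notes on version B (the rewrite author's own statement) =====
-- stated objective: alternative
-- what changed: Replaces A's stateful counting loop (increment categories[color] per element, break on nonzero) by a direct construction: clamp the prefix length n = max(0, min(limit, len)), find the index of the first nonzero color in that prefix, and build [idx-or-n, 0, 0, 0] plus one increment at the found color.
import Mathlib
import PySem

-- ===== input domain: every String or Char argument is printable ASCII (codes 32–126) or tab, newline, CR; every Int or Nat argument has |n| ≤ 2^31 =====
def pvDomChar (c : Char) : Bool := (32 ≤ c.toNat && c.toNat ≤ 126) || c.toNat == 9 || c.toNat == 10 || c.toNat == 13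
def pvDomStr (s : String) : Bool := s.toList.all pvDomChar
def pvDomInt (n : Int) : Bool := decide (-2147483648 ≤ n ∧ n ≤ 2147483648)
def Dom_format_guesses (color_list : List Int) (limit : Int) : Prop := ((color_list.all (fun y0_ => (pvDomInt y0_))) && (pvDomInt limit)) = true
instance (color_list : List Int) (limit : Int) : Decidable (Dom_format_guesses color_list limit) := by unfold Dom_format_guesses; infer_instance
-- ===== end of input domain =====

-- B rebuilds the result from the clamped prefix length and the index of the first
-- nonzero color instead of A's stateful counting loop; return values agree on Pre_.

-- ===== PORT A =====
-- categories[color] += 1 : Python get-then-set with a possibly negative index;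
-- exact (via pyGetD/pySetD defaults) whenever -4 ≤ color ≤ 3, which Pre_ guarantees
-- for every color actually accessed (out-of-range colors raise IndexError in Python).
def pyIncr (cats : List Int) (c : Int) : List Int :=
  PySem.List.pySetD cats c (PySem.List.pyGetD cats c 0 + 1)

def fgA_loop (limit : Int) (cats : List Int) (i : Nat) : List Int → List Int
  | [] => cats
  | c :: rest =>
    if (i : Int) ≥ limit then cats
    else
      let cats' := pyIncr cats c
      if c ≠ 0 then cats' else fgA_loop limit cats' (i + 1) rest

def format_guesses (color_list : List Int) (limit : Int) : List Int :=
  fgA_loop limit [0, 0, 0, 0] 0 color_list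

-- ===== PORT B =====
def format_guesses_alt (color_list : List Int) (limit : Int) : List Int :=
  let n : Nat := (max 0 (min limit (color_list.length : Int))).toNat
  let pre := color_list.take n
  match pre.findIdx? (fun c => c != 0) with
  | none => [(n : Int), 0, 0, 0]
  | some i => pyIncr [(i : Int), 0, 0, 0] (pre.getD i 0)

-- ===== PRECONDITION & SPEC =====
-- Pre_ excludes exactly the inputs on which Python A raises IndexError: those whose
-- first nonzero color within the clamped prefix lies outside the valid index range
-- [-4, 3] of the 4-element categories list (B raises there as well).
def preB (color_list : List Int) (limit : Int) : Bool :=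
  match (color_list.take (max 0 (min limit (color_list.length : Int))).toNat).find? (fun c => c != 0) with
  | some c => decide (-4 ≤ c ∧ c ≤ 3)
  | none => true

def Pre_format_guesses (color_list : List Int) (limit : Int) : Prop := preB color_list limit = true
instance (color_list : List Int) (limit : Int) : Decidable (Pre_format_guesses color_list limit) := by
  unfold Pre_format_guesses; infer_instance

def pvWitness_format_guesses : List Int × Int := ([0, 0, 1, 2], 5)

def Spec_format_guesses (color_list : List Int) (limit : Int) (out : List Int) : Prop := out = format_guesses_alt color_list limit
instance (color_list : List Int) (limit : Int) (out : List Int) : Decidable (Spec_format_guesses color_list limit out) := by unfold Spec_format_guesses; infer_instance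

-- ===== CLAIM (what is proved, stated in full; the proofs are below) =====
def Claim_equal_format_guesses : Prop := ∀ (color_list : List Int) (limit : Int), Dom_format_guesses color_list limit → Pre_format_guesses color_list limit → Spec_format_guesses color_list limit (format_guesses color_list limit)

-- ===== LEMMAS AND PROOFS =====

-- B's result as a function of an accumulated leading-zero count k (proof-only helper).
def altK (color_list : List Int) (limit : Int) (k : Int) : List Int :=
  let n : Nat := (max 0 (min limit (color_list.length : Int))).toNat
  let pre := color_list.take n
  match pre.findIdx? (fun c => c != 0) with
  | none => [k + (n : Int), 0, 0, 0]
  | some i => pyIncr [k + (i : Int), 0, 0, 0] (pre.getD i 0)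

lemma pyIncr_zero (k : Int) : pyIncr [k, 0, 0, 0] 0 = [k + 1, 0, 0, 0] := by
  simp [pyIncr, PySem.List.pySetD_of_nonneg, PySem.List.pyGetD_zero_cons]

lemma fgA_loop_cons_stop (limit : Int) (cats : List Int) (i : Nat) (c : Int) (rest : List Int)
    (h : (i : Int) ≥ limit) : fgA_loop limit cats i (c :: rest) = cats := by
  simp only [fgA_loop, if_pos h]

lemma fgA_loop_cons_zero (limit : Int) (cats : List Int) (i : Nat) (rest : List Int)
    (h : ¬ (i : Int) ≥ limit) :
    fgA_loop limit cats i ((0 : Int) :: rest) = fgA_loop limit (pyIncr cats 0) (i + 1) rest := by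
  simp only [fgA_loop, if_neg h]
  simp

lemma fgA_loop_cons_nz (limit : Int) (cats : List Int) (i : Nat) (c : Int) (rest : List Int)
    (h : ¬ (i : Int) ≥ limit) (hc : c ≠ 0) :
    fgA_loop limit cats i (c :: rest) = pyIncr cats c := by
  simp only [fgA_loop, if_neg h, if_pos hc]

lemma fgA_loop_shift (l : List Int) : ∀ (limit : Int) (cats : List Int) (i : Nat),
    fgA_loop limit cats i l = fgA_loop (limit - i) cats 0 l := by
  induction l with
  | nil => intro limit cats i; simp [fgA_loop]
  | cons c rest ih =>
    intro limit cats i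
    by_cases h : (i : Int) ≥ limit
    · rw [fgA_loop_cons_stop _ _ _ _ _ h,
        fgA_loop_cons_stop _ _ _ _ _ (by push_cast; omega)]
    · by_cases hc : c = 0
      · subst hc
        rw [fgA_loop_cons_zero _ _ _ _ h,
          fgA_loop_cons_zero _ _ _ _ (by push_cast; omega)]
        rw [ih limit _ (i + 1), ih (limit - i) _ (0 + 1)]
        congr 1
        push_cast
        ring
      · rw [fgA_loop_cons_nz _ _ _ _ _ h hc,
          fgA_loop_cons_nz _ _ _ _ _ (by push_cast; omega) hc]

lemma clamp_zero_of_nonpos (l : List Int) (limit : Int) (h : limit ≤ 0) :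
    (max 0 (min limit (l.length : Int))).toNat = 0 := by omega

lemma altK_cons_zero (rest : List Int) (limit k : Int) (h : 0 < limit) :
    altK ((0 : Int) :: rest) limit k = altK rest (limit - 1) (k + 1) := by
  have hn : (max 0 (min limit (((0 : Int) :: rest).length : Int))).toNat =
      (max 0 (min (limit - 1) ((rest.length : Int)))).toNat + 1 := by
    simp only [List.length_cons]
    push_cast
    omega
  simp only [altK, hn, List.take_succ_cons, List.findIdx?_cons]
  simp only [bne_self_eq_false, Bool.false_eq_true, if_false]
  cases hf : (rest.take (max 0 (min (limit - 1) ((rest.length : Int)))).toNat).findIdx?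
      (fun c => c != 0) with
  | none =>
    simp only [Option.map_none]
    push_cast
    ring_nf
  | some i =>
    simp only [Option.map_some, List.getD_cons_succ]
    congr 1
    push_cast
    ring_nf

lemma altK_cons_nz (rest : List Int) (limit k c : Int) (h : 0 < limit) (hc : c ≠ 0) :
    altK (c :: rest) limit k = pyIncr [k, 0, 0, 0] c := by
  have hn : (max 0 (min limit ((c :: rest).length : Int))).toNat =
      (max 0 (min (limit - 1) ((rest.length : Int)))).toNat + 1 := by
    simp only [List.length_cons]
    push_cast
    omega
  have hcb : (c != 0) = true := by simpa using hc
  simp only [altK, hn, List.take_succ_cons, List.findIdx?_cons, hcb, if_true]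
  simp

lemma main_lemma (l : List Int) : ∀ (limit k : Int),
    fgA_loop limit [k, 0, 0, 0] 0 l = altK l limit k := by
  induction l with
  | nil =>
    intro limit k
    simp [fgA_loop, altK]
  | cons c rest ih =>
    intro limit k
    by_cases hl : limit ≤ 0
    · rw [fgA_loop_cons_stop _ _ _ _ _ (by push_cast; omega)]
      simp only [altK, clamp_zero_of_nonpos _ _ hl, List.take_zero, List.findIdx?_nil]
      simp
    · have hl' : ¬ ((0 : Nat) : Int) ≥ limit := by push_cast; omega
      by_cases hc : c = 0
      · subst hc
        rw [fgA_loop_cons_zero _ _ _ _ hl', pyIncr_zero, fgA_loop_shift]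
        have : limit - ((0 + 1 : Nat) : Int) = limit - 1 := by push_cast; ring
        rw [this, ih (limit - 1) (k + 1), altK_cons_zero _ _ _ (by omega)]
      · rw [fgA_loop_cons_nz _ _ _ _ _ hl' hc, altK_cons_nz _ _ _ _ (by omega) hc]

-- ===== VERDICT (by name: the statement is the Claim_ definition above) =====
theorem format_guesses_spec : Claim_equal_format_guesses := by
  intro color_list limit _ _
  show format_guesses color_list limit = format_guesses_alt color_list limit
  unfold format_guesses format_guesses_alt
  rw [main_lemma]
  simp only [altK]
  cases hf : (color_list.take (max 0 (min limit ((color_list.length : Int)))).toNat).findIdx?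
      (fun c => c != 0) with
  | none => simp
  | some i => simp
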